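-- pv_equiv track=rewrite | github.com/teano-uTTu-9788/ag06_mixer | meta_velocity_deployment_2025.py | _select_ai_template
-- ===== SOURCE A (Python) =====
-- from typing import Dict, Any, List, Optional, Union
--
-- def _select_ai_template(files: List[str]) -> str:
--     """Select appropriate AI review template"""
--     if any("frontend" in f or "react" in f for f in files):
--         return "frontend_deployment"
--     elif any("api" in f or "endpoint" in f for f in files):
--         return "api_changes"
--     elif any("security" in f or "auth" in f for f in files):
--         return "security_changes"
--     else:
--         return "frontend_deployment"  # Default
-- ===== SOURCE B (Python) =====
-- def _select_ai_template(files):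
--     """Select appropriate AI review template (single pass over files)."""
--     matched = set()
--     for f in files:
--         if "frontend" in f or "react" in f:
--             matched.add("frontend")
--         if "api" in f or "endpoint" in f:
--             matched.add("api")
--         if "security" in f or "auth" in f:
--             matched.add("security")
--     if "frontend" in matched:
--         return "frontend_deployment"
--     if "api" in matched:
--         return "api_changes"
--     if "security" in matched:
--         return "security_changes"
--     return "frontend_deployment"  # Default
-- ===== Notes on version B (the rewrite author's own statement) =====
-- stated objective: alternative
-- what changed: B makes a single pass over files maintaining a set of matched categories and then picks by priority, instead of A's three separate short-circuited any() scans.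
import Mathlib
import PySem

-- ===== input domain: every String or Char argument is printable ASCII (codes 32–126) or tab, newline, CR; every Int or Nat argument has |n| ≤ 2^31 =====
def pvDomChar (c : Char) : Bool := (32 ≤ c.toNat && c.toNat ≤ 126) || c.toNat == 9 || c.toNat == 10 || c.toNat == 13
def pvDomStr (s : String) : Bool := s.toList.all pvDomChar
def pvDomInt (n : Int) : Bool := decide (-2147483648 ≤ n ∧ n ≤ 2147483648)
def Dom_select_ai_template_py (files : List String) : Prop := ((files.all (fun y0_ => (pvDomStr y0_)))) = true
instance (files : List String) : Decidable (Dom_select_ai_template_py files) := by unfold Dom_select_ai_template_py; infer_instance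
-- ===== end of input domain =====

-- B replaces A's three separate short-circuited any() scans by one pass collecting matched categories into a set, then selects by priority (alternative decomposition, same cost).


-- ===== PORT A =====
def select_ai_template_py (files : List String) : String :=
  if files.any (fun f => PySem.Str.isIn "frontend" f || PySem.Str.isIn "react" f) then
    "frontend_deployment"
  else if files.any (fun f => PySem.Str.isIn "api" f || PySem.Str.isIn "endpoint" f) then
    "api_changes"
  else if files.any (fun f => PySem.Str.isIn "security" f || PySem.Str.isIn "auth" f) then
    "security_changes"
  else
    "frontend_deployment"

-- ===== PORT B =====
-- one pass: collect matched categories into a set, then select by priority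
def selTplStep (m : PySem.Set String) (f : String) : PySem.Set String :=
  let m := if PySem.Str.isIn "frontend" f || PySem.Str.isIn "react" f then m.add "frontend" else m
  let m := if PySem.Str.isIn "api" f || PySem.Str.isIn "endpoint" f then m.add "api" else m
  if PySem.Str.isIn "security" f || PySem.Str.isIn "auth" f then m.add "security" else m

def select_ai_template_py_alt (files : List String) : String :=
  let matched := files.foldl selTplStep PySem.Set.empty
  if matched.contains "frontend" then "frontend_deployment"
  else if matched.contains "api" then "api_changes"
  else if matched.contains "security" then "security_changes"
  else "frontend_deployment"

-- ===== PRECONDITION & SPEC =====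
def Spec_select_ai_template_py (files : List String) (out : String) : Prop := out = select_ai_template_py_alt files
instance (files : List String) (out : String) : Decidable (Spec_select_ai_template_py files out) := by unfold Spec_select_ai_template_py; infer_instance

-- ===== CLAIM (what is proved, stated in full; the proofs are below) =====
def Claim_equal_select_ai_template_py : Prop := ∀ (files : List String), Dom_select_ai_template_py files → Spec_select_ai_template_py files (select_ai_template_py files)

-- ===== LEMMAS AND PROOFS =====
lemma selTpl_fold_contains (files : List String) (m : PySem.Set String) (c : String)
    (pc : String → Bool)
    (hstep : ∀ (m : PySem.Set String) (f : String),
      (selTplStep m f).contains c = (m.contains c || pc f)) :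
    (files.foldl selTplStep m).contains c = (m.contains c || files.any pc) := by
  induction files generalizing m with
  | nil => simp
  | cons f fs ih =>
    simp only [List.foldl_cons, List.any_cons]
    rw [ih, hstep]
    cases m.contains c <;> cases pc f <;> simp

lemma selTpl_step_frontend (m : PySem.Set String) (f : String) :
    (selTplStep m f).contains "frontend"
      = (m.contains "frontend" || (PySem.Str.isIn "frontend" f || PySem.Str.isIn "react" f)) := by
  unfold selTplStep
  split_ifs <;> simp_all

lemma selTpl_step_api (m : PySem.Set String) (f : String) :
    (selTplStep m f).contains "api"
      = (m.contains "api" || (PySem.Str.isIn "api" f || PySem.Str.isIn "endpoint" f)) := by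
  unfold selTplStep
  split_ifs <;> simp_all

lemma selTpl_step_security (m : PySem.Set String) (f : String) :
    (selTplStep m f).contains "security"
      = (m.contains "security" || (PySem.Str.isIn "security" f || PySem.Str.isIn "auth" f)) := by
  unfold selTplStep
  split_ifs <;> simp_all


-- ===== VERDICT (by name: the statement is the Claim_ definition above) =====
theorem select_ai_template_py_spec : Claim_equal_select_ai_template_py := by
  intro files _
  unfold Spec_select_ai_template_py select_ai_template_py select_ai_template_py_alt
  simp only [selTpl_fold_contains files PySem.Set.empty "frontend" _ selTpl_step_frontend,
    selTpl_fold_contains files PySem.Set.empty "api" _ selTpl_step_api,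
    selTpl_fold_contains files PySem.Set.empty "security" _ selTpl_step_security]
  simp [PySem.Set.empty]
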